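-- pv_equiv track=rewrite | github.com/PrepForDev/fndWikiUpdater | utils/misc.py | group_data_by_hero
-- ===== SOURCE A (Python) =====
-- def group_data_by_hero(data):
--   if not data:
--     return
--   name_index = data[0].index('Name')
--   groups = []
--   current_group = []
--   current_name = None
--
--   for line in data[1:]:
--     line_name = line[name_index]
--     if current_name is None or line_name == current_name:
--       current_group.append(line)
--       current_name = line_name
--     else:
--       if current_group:
--         groups.append(current_group)
--       current_group = [line]
--       current_name = line_name
--   if current_group:
--     groups.append(current_group)
--
--   for group in groups:
--     if len(group) < 5:
--       group.append(['']*44)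
--   return groups
-- ===== SOURCE B (Python) =====
-- def group_data_by_hero(data):
--   # Return value only; like A, returns None on empty input.
--   if not data:
--     return None
--   name_index = data[0].index('Name')
--   rows = data[1:]
--   groups = []
--   i = 0
--   n = len(rows)
--   while i < n:
--     j = i + 1
--     while j < n and rows[j][name_index] == rows[i][name_index]:
--       j += 1
--     groups.append(rows[i:j])
--     i = j
--   return [g + [[''] * 44] if len(g) < 5 else g for g in groups]
-- ===== Notes on version B (the rewrite author's own statement) =====
-- stated objective: alternative
-- what changed: Replaces A's current_name/current_group state-machine fold (with end-of-loop flush and in-place padding) by two-pointer run detection that slices each maximal consecutive run out of the rows directly, padding via a comprehension.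
import Mathlib
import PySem

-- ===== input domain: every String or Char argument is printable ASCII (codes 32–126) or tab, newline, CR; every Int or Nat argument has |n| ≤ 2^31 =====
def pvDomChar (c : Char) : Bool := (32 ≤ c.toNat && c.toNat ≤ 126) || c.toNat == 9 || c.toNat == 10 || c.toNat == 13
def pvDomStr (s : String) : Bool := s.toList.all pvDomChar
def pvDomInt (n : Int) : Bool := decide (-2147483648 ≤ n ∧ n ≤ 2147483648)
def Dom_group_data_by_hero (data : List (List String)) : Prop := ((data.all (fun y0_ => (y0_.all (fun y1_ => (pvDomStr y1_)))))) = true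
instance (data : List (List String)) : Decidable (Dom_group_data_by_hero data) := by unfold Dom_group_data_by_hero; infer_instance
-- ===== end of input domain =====

-- B replaces A's current_name/current_group state-machine fold by direct run-slicing (two-pointer
-- run detection) with comprehension padding; equivalence of the RETURN values is proved on Pre_.


-- ===== PORT A =====
-- line[name_index]; on Pre_ the index is in range, so the default is never used
def keyOf (nameIndex : Int) (line : List String) : String := PySem.List.pyGetD line nameIndex ""

-- one iteration of A's for-loop: state = (groups, current_group, current_name)
def stepA (nameIndex : Int)
    (st : List (List (List String)) × List (List String) × Option String)
    (line : List String) : List (List (List String)) × List (List String) × Option String :=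
  let lineName := keyOf nameIndex line
  if st.2.2 = none ∨ some lineName = st.2.2 then
    (st.1, st.2.1 ++ [line], some lineName)
  else
    ((if st.2.1 ≠ [] then st.1 ++ [st.2.1] else st.1), [line], some lineName)

def group_data_by_hero (data : List (List String)) : Option (List (List (List String))) :=
  match data with
  | [] => none
  | header :: rest =>
    -- data[0].index('Name'); ValueError (no 'Name') is excluded by Pre_, so getD 0 is never used
    let nameIndex : Int := ((PySem.List.index? header "Name").getD 0 : Nat)
    let s := rest.foldl (stepA nameIndex) ([], [], none)
    let groups := if s.2.1 ≠ [] then s.1 ++ [s.2.1] else s.1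
    some (groups.map (fun g => if g.length < 5 then g ++ [List.replicate 44 ""] else g))

-- ===== PORT B =====
def padGroup (g : List (List String)) : List (List String) :=
  if g.length < 5 then g ++ [List.replicate 44 ""] else g

-- B's outer while-loop: slice out the maximal run rows[i:j] sharing the first row's key, recurse on the rest
def groupRuns (k : List String → String) : List (List String) → List (List (List String))
  | [] => []
  | x :: xs =>
    (x :: xs.takeWhile (fun y => k y == k x)) :: groupRuns k (xs.dropWhile (fun y => k y == k x))
termination_by l => l.length
decreasing_by
  have := List.length_dropWhile_le (fun y => k y == k x) xs
  simp only [List.length_cons]; omega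

def group_data_by_hero_alt (data : List (List String)) : Option (List (List (List String))) :=
  match data with
  | [] => none
  | header :: rest =>
    let nameIndex : Int := ((PySem.List.index? header "Name").getD 0 : Nat)
    some ((groupRuns (keyOf nameIndex) rest).map padGroup)

-- ===== PRECONDITION & SPEC =====
-- Pre_ excludes exactly the inputs where Python A raises: a nonempty data whose header lacks 'Name'
-- (ValueError from .index) or with a data row too short for name_index (IndexError).
def Pre_group_data_by_hero (data : List (List String)) : Prop :=
  data = [] ∨ ("Name" ∈ data.headD [] ∧ ∀ line ∈ data.tail, (data.headD []).idxOf "Name" < line.length)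
instance (data : List (List String)) : Decidable (Pre_group_data_by_hero data) := by
  unfold Pre_group_data_by_hero; infer_instance
def pvWitness_group_data_by_hero : List (List String) := [["Name"], ["h1"], ["h1"], ["h2"]]

def Spec_group_data_by_hero (data : List (List String)) (out : Option (List (List (List String)))) : Prop := out = group_data_by_hero_alt data
instance (data : List (List String)) (out : Option (List (List (List String)))) : Decidable (Spec_group_data_by_hero data out) := by unfold Spec_group_data_by_hero; infer_instance

-- ===== CLAIM (what is proved, stated in full; the proofs are below) =====
def Claim_equal_group_data_by_hero : Prop := ∀ (data : List (List String)), Dom_group_data_by_hero data → Pre_group_data_by_hero data → Spec_group_data_by_hero data (group_data_by_hero data)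

-- ===== LEMMAS AND PROOFS =====

-- proof-only alias for A's loop body, with the key function abstracted
def loopStep (k : List String → String)
    (st : List (List (List String)) × List (List String) × Option String)
    (line : List String) : List (List (List String)) × List (List String) × Option String :=
  if st.2.2 = none ∨ some (k line) = st.2.2 then
    (st.1, st.2.1 ++ [line], some (k line))
  else
    ((if st.2.1 ≠ [] then st.1 ++ [st.2.1] else st.1), [line], some (k line))

lemma stepA_eq (nameIndex : Int) : stepA nameIndex = loopStep (keyOf nameIndex) := rfl

-- A's loop from a reachable state (current group ending in x, current_name = key of x) followed by
-- the final flush produces: the pending group extended by the run of x's key, then B's run groups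
-- of the remaining rows.
lemma loop_runs (k : List String → String) :
    ∀ (xs : List (List String)) (groups : List (List (List String)))
      (cur : List (List String)) (x : List String),
      (let s := xs.foldl (loopStep k) (groups, cur ++ [x], some (k x));
       if s.2.1 ≠ [] then s.1 ++ [s.2.1] else s.1)
      = groups ++ ((cur ++ x :: xs.takeWhile (fun y => k y == k x))
          :: groupRuns k (xs.dropWhile (fun y => k y == k x))) := by
  intro xs
  induction xs with
  | nil =>
    intro groups cur x
    simp [groupRuns]
  | cons y ys ih =>
    intro groups cur x
    simp only [List.foldl_cons, List.takeWhile_cons, List.dropWhile_cons]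
    by_cases h : k y = k x
    · have hthis := ih groups (cur ++ [x]) y
      simp only [h] at hthis
      simp only [List.append_assoc, List.cons_append, List.nil_append] at hthis
      simp [loopStep, h, hthis]
    · have hb : (k y == k x) = false := beq_false_of_ne h
      have hcond : ¬ ((some (k x) : Option String) = none ∨ some (k y) = some (k x)) := by
        simp [h]
      have hne : cur ++ [x] ≠ [] := by simp
      simp only [loopStep, if_neg hcond, if_pos hne, hb, Bool.false_eq_true, if_false]
      have hthis := ih (groups ++ [cur ++ [x]]) [] y
      simp only [List.nil_append] at hthis
      rw [hthis, groupRuns]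
      simp

-- ===== VERDICT (by name: the statement is the Claim_ definition above) =====
theorem group_data_by_hero_spec : Claim_equal_group_data_by_hero := by
  intro data _ _
  unfold Spec_group_data_by_hero group_data_by_hero group_data_by_hero_alt
  match data with
  | [] => rfl
  | header :: rest =>
    simp only [stepA_eq]
    set k := keyOf ((PySem.List.index? header "Name").getD 0 : Nat) with hk
    match rest with
    | [] => simp [groupRuns]
    | y :: ys =>
      congr 1
      simp only [List.foldl_cons]
      have h1 : loopStep k ([], [], none) y = ([], [y], some (k y)) := by
        simp [loopStep]
      rw [h1]
      have hthis := loop_runs k ys [] [] y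
      simp only [List.nil_append] at hthis
      rw [hthis, groupRuns]
      rfl
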